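-- pv_equiv track=rewrite | github.com/rico-taylor/Artificial-Drift3 | code/main.py | highestGate
-- ===== SOURCE A (Python) =====
-- def highestGate(listt):
--   loops = 0
--   biggest = 0
--   for x in listt:
--     loops += 1
--     if x == True:
--       biggest = loops
--   return biggest
-- ===== SOURCE B (Python) =====
-- def highestGate(listt):
--     items = list(listt)
--     for i in range(len(items) - 1, -1, -1):
--         if items[i] == True:
--             return i + 1
--     return 0
-- ===== Notes on version B (the rewrite author's own statement) =====
-- stated objective: simpler
-- what changed: Scans the list backwards and returns at the first True instead of a full forward pass accumulating a counter and the last-seen position.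
import Mathlib
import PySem

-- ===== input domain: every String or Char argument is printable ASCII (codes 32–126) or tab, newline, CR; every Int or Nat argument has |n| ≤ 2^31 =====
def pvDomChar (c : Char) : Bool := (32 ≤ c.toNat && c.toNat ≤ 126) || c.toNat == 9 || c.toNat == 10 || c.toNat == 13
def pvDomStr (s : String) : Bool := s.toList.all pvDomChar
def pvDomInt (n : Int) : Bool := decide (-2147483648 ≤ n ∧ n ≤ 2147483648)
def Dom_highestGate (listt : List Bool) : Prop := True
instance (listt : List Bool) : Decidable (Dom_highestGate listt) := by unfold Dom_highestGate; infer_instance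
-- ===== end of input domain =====

-- B scans from the back and returns at the first True, instead of A's forward pass keeping a counter.

-- ===== PORT A =====
-- forward loop: state (loops, biggest), one step per element
def hgStep (s : Int × Int) (x : Bool) : Int × Int :=
  (s.1 + 1, if x == true then s.1 + 1 else s.2)

def highestGate (listt : List Bool) : Int :=
  (listt.foldl hgStep (0, 0)).2

-- ===== PORT B =====
-- backward scan: index i runs len-1, …, 0; return i+1 at the first True, else 0
def hgAltAux (items : List Bool) : Nat → Int
  | 0 => 0
  | n + 1 => if items.getD n false == true then (n : Int) + 1 else hgAltAux items n

def highestGate_alt (listt : List Bool) : Int := hgAltAux listt listt.length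

-- ===== PRECONDITION & SPEC =====
def Spec_highestGate (listt : List Bool) (out : Int) : Prop := out = highestGate_alt listt
instance (listt : List Bool) (out : Int) : Decidable (Spec_highestGate listt out) := by unfold Spec_highestGate; infer_instance

-- ===== CLAIM (what is proved, stated in full; the proofs are below) =====
def Claim_equal_highestGate : Prop := ∀ (listt : List Bool), Dom_highestGate listt → Spec_highestGate listt (highestGate listt)

-- ===== LEMMAS AND PROOFS =====
theorem hg_fold_fst (xs : List Bool) (c b : Int) :
    (xs.foldl hgStep (c, b)).1 = c + xs.length := by
  induction xs generalizing c b with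
  | nil => simp
  | cons x xs ih =>
    rw [List.foldl_cons, show hgStep (c, b) x = (c + 1, if x == true then c + 1 else b) from rfl,
      ih]
    simp only [List.length_cons]; push_cast; ring

theorem hgAltAux_append (xs : List Bool) (x : Bool) (n : Nat) (h : n ≤ xs.length) :
    hgAltAux (xs ++ [x]) n = hgAltAux xs n := by
  induction n with
  | zero => rfl
  | succ n ih =>
    have hn : n < xs.length := h
    simp [hgAltAux, List.getD, List.getElem?_append_left hn, ih (Nat.le_of_lt hn)]

theorem hg_eq (xs : List Bool) : highestGate xs = highestGate_alt xs := by
  induction xs using List.reverseRecOn with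
  | nil => rfl
  | append_singleton xs x ih =>
    simp only [highestGate, highestGate_alt, List.foldl_append, List.foldl_cons, List.foldl_nil,
      List.length_append, List.length_cons, List.length_nil, Nat.zero_add] at *
    cases x with
    | true =>
      rw [show ∀ s : Int × Int, (hgStep s true).2 = s.1 + 1 from fun s => rfl,
        hg_fold_fst xs 0 0]
      simp [hgAltAux]
    | false =>
      rw [show ∀ s : Int × Int, (hgStep s false).2 = s.2 from fun s => rfl, ih]
      simp [hgAltAux, hgAltAux_append xs false xs.length (Nat.le_refl _)]

-- ===== VERDICT (by name: the statement is the Claim_ definition above) =====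
theorem highestGate_spec : Claim_equal_highestGate := by
  intro l _; exact hg_eq l
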